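-- pv_equiv track=rewrite | github.com/jiyasahni4/myapp | Huffman_encoding_decoding.py | calProb
-- ===== SOURCE A (Python) =====
-- def calProb(the_data):   #calculates frequency of letters
--     the_symbols=dict()
--     for i in the_data:
--         if the_symbols.get(i)==None:
--             the_symbols[i]=1
--         else:
--             the_symbols[i]+=1
--     return the_symbols
-- ===== SOURCE B (Python) =====
-- def calProb(the_data):   # distinct symbols first, then count each by scanning
--     items = list(the_data)
--     return {s: items.count(s) for s in dict.fromkeys(items)}
-- ===== Notes on version B (the rewrite author's own statement) =====
-- stated objective: alternative
-- what changed: Replaced the single accumulating dict pass with an enumerate-distinct-symbols-first (dict.fromkeys) strategy that then counts each distinct symbol with list.count; key order (first appearance) and counts are identical.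
import Mathlib
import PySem

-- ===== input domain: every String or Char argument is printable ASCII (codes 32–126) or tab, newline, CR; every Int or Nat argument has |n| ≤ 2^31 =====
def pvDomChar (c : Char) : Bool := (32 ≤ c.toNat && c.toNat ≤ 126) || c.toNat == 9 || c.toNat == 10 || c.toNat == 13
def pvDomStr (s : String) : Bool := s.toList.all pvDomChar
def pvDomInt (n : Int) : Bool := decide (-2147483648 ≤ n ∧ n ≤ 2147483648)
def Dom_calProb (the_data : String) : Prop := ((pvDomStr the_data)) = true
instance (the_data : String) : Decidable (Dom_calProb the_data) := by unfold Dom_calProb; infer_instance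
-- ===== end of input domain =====

-- B counts frequencies by enumerating distinct symbols first (dict.fromkeys) and scanning with list.count, instead of A's single accumulating dict pass; objective: alternative decomposition, same results.


-- ===== PORT A =====
-- for i in the_data: iterating a Python str yields 1-char strings
def pyChars (the_data : String) : List String :=
  the_data.toList.map (fun c => String.ofList [c])

def calProbStep (d : PySem.Dict String Int) (i : String) : PySem.Dict String Int :=
  match d.get? i with
  | none => d.insert i 1
  | some v => d.insert i (v + 1)

def calProb (the_data : String) : List (String × Int) :=
  ((pyChars the_data).foldl calProbStep PySem.Dict.empty).items

-- ===== PORT B =====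
def calProb_alt (the_data : String) : List (String × Int) :=
  let items := pyChars the_data
  (PySem.List.dedup items).map (fun s => (s, (PySem.List.count items s : Int)))

-- ===== PRECONDITION & SPEC =====
def Spec_calProb (the_data : String) (out : List (String × Int)) : Prop := out = calProb_alt the_data
instance (the_data : String) (out : List (String × Int)) : Decidable (Spec_calProb the_data out) := by unfold Spec_calProb; infer_instance

-- ===== CLAIM (what is proved, stated in full; the proofs are below) =====
def Claim_equal_calProb : Prop := ∀ (the_data : String), Dom_calProb the_data → Spec_calProb the_data (calProb the_data)

-- ===== LEMMAS AND PROOFS =====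

-- ===== VERDICT (by name: the statement is the Claim_ definition above) =====
lemma calProbStep_eq (d : PySem.Dict String Int) (i : String) :
    calProbStep d i = d.insert i (d.getD i 0 + 1) := by
  unfold calProbStep
  rcases h : d.get? i with _ | v
  · simp [PySem.Dict.getD_eq_get?_getD, h]
  · simp [PySem.Dict.getD_eq_get?_getD, h]

theorem calProb_spec : Claim_equal_calProb := by
  intro the_data _
  unfold Spec_calProb calProb calProb_alt
  have hstep : calProbStep = fun (d : PySem.Dict String Int) (i : String) =>
      d.insert i (d.getD i 0 + 1) := by
    funext d i; exact calProbStep_eq d i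
  rw [hstep, PySem.Dict.foldl_insert_getD_add_one_eq_counter,
      PySem.Dict.items_counter]
  simp [PySem.List.dedup_eq_ofList, PySem.List.count_eq]
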